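-- pv_equiv track=rewrite | github.com/rmpurp/GenerateWords | generate.py | containsLetters
-- ===== SOURCE A (Python) =====
-- LETTERS = 'rtyufghjvbnm'
--
-- MIN_NUM = -7
--
-- def containsLetters(word):
--     myletters = LETTERS
--     counter = 0
--     for x in word:
--         if x in myletters:
--             if MIN_NUM > 0:
--                 myletters = myletters.replace(x, '')
--             counter += 1
--     return counter > abs(MIN_NUM)
-- ===== SOURCE B (Python) =====
-- LETTERS = 'rtyufghjvbnm'
--
-- def containsLetters(word):
--     total = 0
--     for c in LETTERS:
--         total += word.count(c)
--     return total > 7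
-- ===== Notes on version B (the rewrite author's own statement) =====
-- stated objective: simpler
-- what changed: B loops over the fixed 12-letter alphabet summing word.count(c) (C-level scans) instead of A's per-character Python-loop membership scan over the word with a dead replace branch and dead state.
import Mathlib
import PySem

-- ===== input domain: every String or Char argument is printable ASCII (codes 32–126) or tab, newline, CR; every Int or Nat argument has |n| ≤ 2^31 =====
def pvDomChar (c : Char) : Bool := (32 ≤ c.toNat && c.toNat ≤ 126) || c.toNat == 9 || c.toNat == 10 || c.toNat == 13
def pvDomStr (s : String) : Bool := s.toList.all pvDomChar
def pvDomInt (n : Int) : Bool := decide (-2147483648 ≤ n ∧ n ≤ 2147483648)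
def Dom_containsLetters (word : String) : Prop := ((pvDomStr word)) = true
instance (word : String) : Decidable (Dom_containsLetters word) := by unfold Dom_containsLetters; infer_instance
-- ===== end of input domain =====

-- B sums word.count(c) over the fixed 12-letter alphabet instead of A's per-character
-- membership pass over the word (objective: simpler; the dead MIN_NUM branch is dropped).

-- ===== PORT A =====
-- LETTERS = 'rtyufghjvbnm'; MIN_NUM = -7
def containsLetters (word : String) : Bool :=
  let MIN_NUM : Int := -7
  -- state = (myletters, counter); Python's 'x in myletters' is substring membership
  let st := word.toList.foldl
    (fun (s : List Char × Int) x =>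
      if PySem.Chars.isIn [x] s.1 then
        (if MIN_NUM > 0 then PySem.Chars.replace s.1 [x] [] else s.1, s.2 + 1)
      else s)
    ("rtyufghjvbnm".toList, 0)
  decide (st.2 > |MIN_NUM|)

-- ===== PORT B =====
def containsLetters_alt (word : String) : Bool :=
  let total := "rtyufghjvbnm".toList.foldl
    (fun (t : Int) c => t + (PySem.Str.count word (String.ofList [c]) : Int)) 0
  decide (total > 7)

-- ===== PRECONDITION & SPEC =====
def Spec_containsLetters (word : String) (out : Bool) : Prop := out = containsLetters_alt word
instance (word : String) (out : Bool) : Decidable (Spec_containsLetters word out) := by unfold Spec_containsLetters; infer_instance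

-- ===== CLAIM (what is proved, stated in full; the proofs are below) =====
def Claim_equal_containsLetters : Prop := ∀ (word : String), Dom_containsLetters word → Spec_containsLetters word (containsLetters word)

-- ===== LEMMAS AND PROOFS =====

-- non-overlapping substring count of a single character is plain element count
theorem go_singleton (c : Char) : ∀ (l : List Char) (fuel acc : Nat), l.length ≤ fuel →
    PySem.Chars.count.go [c] fuel l acc = acc + l.count c := by
  intro l
  induction l with
  | nil => intro fuel acc _; cases fuel <;> simp [PySem.Chars.count.go]
  | cons h t ih =>
      intro fuel acc hle
      cases fuel with
      | zero => simp at hle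
      | succ f =>
          simp only [PySem.Chars.count.go]
          by_cases hc : c = h
          · subst hc
            simp [List.isPrefixOf, ih f (acc + 1) (by simpa using hle)]
            omega
          · have hp : ([c].isPrefixOf (h :: t)) = false := by
              simp [List.isPrefixOf]; exact fun e => hc (by simpa using e)
            simp only [hp, Bool.false_eq_true, if_false, ih f acc (by simpa using hle),
              List.count_cons]
            have hb : (h == c) = false := by
              simp only [beq_eq_false_iff_ne, ne_eq]
              intro q; exact hc q.symm
            simp [hb]

theorem count_singleton (s : List Char) (c : Char) :
    PySem.Chars.count s [c] = s.count c := by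
  simpa [PySem.Chars.count] using go_singleton c s s.length 0 le_rfl

theorem isIn_single (x : Char) (L : List Char) :
    PySem.Chars.isIn [x] L = decide (x ∈ L) := by
  by_cases h : x ∈ L
  · simp only [h, decide_true]
    rw [PySem.Chars.isIn_iff_infix]
    obtain ⟨l₁, l₂, rfl⟩ := List.append_of_mem h
    exact ⟨l₁, l₂, by simp⟩
  · simp only [h, decide_false]
    rw [PySem.Chars.isIn_eq_false_iff]
    intro hinf
    exact h (hinf.mem (by simp))

-- A's loop with the membership test simplified: the letter list is invariant,
-- the counter counts the members
theorem foldSimple (L : List Char) : ∀ (w : List Char) (acc : Int),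
    w.foldl (fun (s : List Char × Int) x => if x ∈ s.1 then (s.1, s.2 + 1) else s) (L, acc)
      = (L, acc + (w.countP (fun x => decide (x ∈ L)) : Int)) := by
  intro w
  induction w with
  | nil => intro acc; simp
  | cons h t ih =>
      intro acc
      rw [List.foldl_cons]
      by_cases hm : h ∈ L
      · show List.foldl _ (if h ∈ L then ((L, acc + 1) : List Char × Int) else (L, acc)) t = _
        rw [if_pos hm, ih (acc + 1), List.countP_cons]
        simp [hm]; ring
      · show List.foldl _ (if h ∈ L then ((L, acc + 1) : List Char × Int) else (L, acc)) t = _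
        rw [if_neg hm, ih acc, List.countP_cons]
        simp [hm]

-- sum of a 0/1 indicator over a duplicate-free list is a membership test
theorem sum_ind (x : Char) (L : List Char) (hL : L.Nodup) :
    (L.map (fun c => if x = c then (1 : Nat) else 0)).sum = if x ∈ L then 1 else 0 := by
  induction L with
  | nil => simp
  | cons h t ih =>
      rw [List.nodup_cons] at hL
      simp only [List.map_cons, List.sum_cons, ih hL.2]
      by_cases e : x = h
      · subst e; simp [hL.1]
      · simp only [e, if_false, Nat.zero_add, List.mem_cons]
        simp

-- sums of pointwise additions split
theorem sum_map_add (L : List Char) (f g : Char → Nat) :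
    (L.map (fun c => f c + g c)).sum = (L.map f).sum + (L.map g).sum := by
  induction L with
  | nil => simp
  | cons h t ih => simp [ih]; omega

-- for a duplicate-free alphabet: sum over L of count c w = countP (mem L) w
theorem sum_counts (L : List Char) (hL : L.Nodup) : ∀ (w : List Char),
    (L.map (fun c => w.count c)).sum = w.countP (fun x => decide (x ∈ L)) := by
  intro w
  induction w with
  | nil => simp
  | cons x t ih =>
      have hc : ∀ c : Char, (x :: t).count c = t.count c + (if x = c then 1 else 0) := by
        intro c
        by_cases e : x = c
        · simp [e]
        · simp [e]
      calc (L.map (fun c => (x :: t).count c)).sum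
          = (L.map (fun c => t.count c + (if x = c then 1 else 0))).sum := by
            simp only [hc]
        _ = (L.map (fun c => t.count c)).sum
              + (L.map (fun c => if x = c then (1 : Nat) else 0)).sum :=
            sum_map_add L _ _
        _ = t.countP (fun y => decide (y ∈ L)) + (if x ∈ L then 1 else 0) := by
            rw [ih, sum_ind x L hL]
        _ = (x :: t).countP (fun y => decide (y ∈ L)) := by
            rw [List.countP_cons]
            by_cases hm : x ∈ L <;> simp [hm]

-- B's loop as a sum
theorem foldB (w : List Char) (L : List Char) : ∀ (acc : Int),
    L.foldl (fun (t : Int) c => t + (w.count c : Int)) acc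
      = acc + ((L.map (fun c => w.count c)).sum : Nat) := by
  induction L with
  | nil => intro acc; simp
  | cons h t ih => intro acc; simp [ih]; ring

-- ===== VERDICT (by name: the statement is the Claim_ definition above) =====
theorem containsLetters_spec : Claim_equal_containsLetters := by
  unfold Claim_equal_containsLetters
  intro word _
  unfold Spec_containsLetters containsLetters containsLetters_alt
  have hfun : (fun (s : List Char × Int) x =>
      if PySem.Chars.isIn [x] s.1 then
        (if (-7 : Int) > 0 then PySem.Chars.replace s.1 [x] [] else s.1, s.2 + 1)
      else s)
      = (fun (s : List Char × Int) x => if x ∈ s.1 then (s.1, s.2 + 1) else s) := by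
    funext s x
    by_cases hx : x ∈ s.1 <;> simp [isIn_single, hx]
  have hcnt : ∀ c : Char, PySem.Str.count word (String.ofList [c]) = word.toList.count c := by
    intro c
    rw [PySem.Str.count_eq]
    simpa using count_singleton word.toList c
  simp only [hfun, hcnt, foldSimple, foldB]
  rw [sum_counts _ (by decide) word.toList]
  norm_num
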